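-- pv_equiv track=rewrite | github.com/yeong0829/CosPro_Python | 모의고사 1/6번.py | solution
-- ===== SOURCE A (Python) =====
-- def solution(left_rings):
--     answer = 0
--     for i in range(len(left_rings)): # i : 왼쪽고리 번호, left_rings[i] : 오른쪽고리 번호
--         if left_rings[i] <= i:      # 왼쪽 / 오른쪽 또는 왼쪽 - 오른쪽
--             for k in range(i):
--                 if left_rings[k] > left_rings[i]:  # 왼쪽 \ 오른쪽
--                     answer += 1
--     return answer
-- ===== SOURCE B (Python) =====
-- def solution(left_rings):
--     answer = 0
--     seen = []  # values of the elements already processed, kept in non-decreasing order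
--     i = 0
--     for v in left_rings:
--         # hand-written bisect_right: first position in seen whose value is > v
--         lo, hi = 0, len(seen)
--         while lo < hi:
--             mid = (lo + hi) // 2
--             if seen[mid] <= v:
--                 lo = mid + 1
--             else:
--                 hi = mid
--         if v <= i:
--             answer += len(seen) - lo  # earlier values strictly greater than v
--         seen.insert(lo, v)
--         i += 1
--     return answer
-- ===== Notes on version B (the rewrite author's own statement) =====
-- stated objective: faster
-- what changed: Instead of re-scanning the whole prefix for each qualifying index, B keeps the earlier values in a sorted list and counts the strictly larger earlier values with one hand-written binary search per element (bisect_right), inserting each value at its search position.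
import Mathlib
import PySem

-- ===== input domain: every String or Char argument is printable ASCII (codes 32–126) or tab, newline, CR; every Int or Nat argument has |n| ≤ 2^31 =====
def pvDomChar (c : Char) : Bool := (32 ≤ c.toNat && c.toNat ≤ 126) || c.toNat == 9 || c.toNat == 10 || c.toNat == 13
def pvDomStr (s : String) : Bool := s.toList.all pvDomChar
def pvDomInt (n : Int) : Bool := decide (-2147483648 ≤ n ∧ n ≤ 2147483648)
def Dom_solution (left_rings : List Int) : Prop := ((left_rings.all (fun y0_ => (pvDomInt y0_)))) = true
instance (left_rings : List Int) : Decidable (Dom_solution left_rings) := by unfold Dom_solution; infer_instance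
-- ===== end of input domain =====

-- B keeps the earlier values in a sorted list and counts the strictly larger earlier
-- values with one hand-written binary search per element, instead of A's rescan of the
-- whole prefix at each qualifying index (return value only; neither program mutates its argument).

-- ===== PORT A =====
-- indices i, k always lie in range(len(left_rings)), so the default of pyGetD is never used — exact
def solution (left_rings : List Int) : Int :=
  (PySem.List.pyRange 0 (PySem.List.len left_rings)).foldl (fun answer i =>
    if PySem.List.pyGetD left_rings i 0 ≤ i then
      (PySem.List.pyRange 0 i).foldl (fun answer2 k =>
        if PySem.List.pyGetD left_rings k 0 > PySem.List.pyGetD left_rings i 0 then answer2 + 1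
        else answer2) answer
    else answer) 0

-- ===== PORT B =====
-- the hand-written while loop of Source B; lo, hi stay within 0..len(seen), so they are Nat;
-- mid = (lo+hi)//2 on nonnegative ints is Nat division; seen[mid] has mid < hi ≤ len(seen),
-- so the default of getD is never used — exact
def bsearch (seen : List Int) (v : Int) (lo hi : Nat) : Nat :=
  if _h : lo < hi then
    let mid := (lo + hi) / 2
    if seen.getD mid 0 ≤ v then bsearch seen v (mid + 1) hi
    else bsearch seen v lo mid
  else lo
termination_by hi - lo
decreasing_by all_goals omega

-- the for-loop of Source B over (seen, i, answer); seen.insert(lo, v) is PySem.List.insert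
def solution_alt (left_rings : List Int) : Int :=
  (left_rings.foldl (fun (st : List Int × Int × Int) v =>
    let seen := st.1
    let i := st.2.1
    let answer := st.2.2
    let lo := bsearch seen v 0 seen.length
    let answer' := if v ≤ i then answer + ((seen.length : Int) - (lo : Int)) else answer
    (PySem.List.insert seen (lo : Int) v, i + 1, answer')) ([], 0, 0)).2.2

-- ===== PRECONDITION & SPEC =====
def Spec_solution (left_rings : List Int) (out : Int) : Prop := out = solution_alt left_rings
instance (left_rings : List Int) (out : Int) : Decidable (Spec_solution left_rings out) := by unfold Spec_solution; infer_instance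

-- ===== CLAIM (what is proved, stated in full; the proofs are below) =====
def Claim_equal_solution : Prop := ∀ (left_rings : List Int), Dom_solution left_rings → Spec_solution left_rings (solution left_rings)

-- ===== LEMMAS AND PROOFS =====

-- common mathematical reading of both programs: the answer contributed by the rest `r`
-- once the prefix `p` has been processed
def spec (p r : List Int) : Int :=
  match r with
  | [] => 0
  | v :: r' =>
    (if v ≤ (p.length : Int) then ((p.countP (fun x => decide (v < x)) : Nat) : Int) else 0)
      + spec (p ++ [v]) r'

-- A's outer loop, started at index p.length, adds spec p r (where l = p ++ r)
lemma goA (l : List Int) :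
    ∀ (r p : List Int) (answer : Int), l = p ++ r →
      (PySem.List.pyRange (p.length : Int) (PySem.List.len l)).foldl (fun answer i =>
        if PySem.List.pyGetD l i 0 ≤ i then
          (PySem.List.pyRange 0 i).foldl (fun answer2 k =>
            if PySem.List.pyGetD l k 0 > PySem.List.pyGetD l i 0 then answer2 + 1
            else answer2) answer
        else answer) answer = answer + spec p r := by
  intro r
  induction r with
  | nil =>
    intro p answer hl
    have : PySem.List.pyRange (p.length : Int) (PySem.List.len l) = [] := by
      subst hl; simp [PySem.List.pyRange, PySem.List.len]
    rw [this]; simp [spec]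
  | cons v r' ih =>
    intro p answer hl
    have hlen : l.length = p.length + (r'.length + 1) := by subst hl; simp
    have hcons : PySem.List.pyRange (p.length : Int) (PySem.List.len l)
        = (p.length : Int) :: PySem.List.pyRange ((p.length : Int) + 1) (PySem.List.len l) := by
      apply PySem.List.pyRange_one_cons
      simp [PySem.List.len]; omega
    rw [hcons, List.foldl_cons]
    -- the value at index p.length is v
    have hv : PySem.List.pyGetD l (p.length : Int) 0 = v := by
      subst hl
      rw [PySem.List.pyGetD_natCast]
      simp [List.getD]
    -- the inner loop counts the earlier strictly-larger values
    have hinner : ∀ a : Int, (PySem.List.pyRange 0 (p.length : Int)).foldl (fun answer2 k =>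
        if PySem.List.pyGetD l k 0 > v then answer2 + 1 else answer2) a
        = a + (p.countP (fun x => decide (v < x)) : Nat) := by
      intro a
      have hlp : (p.length : Int) = PySem.List.len p := by simp [PySem.List.len]
      rw [hlp]
      rw [PySem.List.foldl_congr_mem
        (g := fun answer2 k => if v < PySem.List.pyGetD p k 0 then answer2 + 1 else answer2)]
      · rw [PySem.List.foldl_pyRange_pyGetD p 0
          (fun answer2 x => if v < x then answer2 + 1 else answer2) a (le_refl 0)]
        rw [PySem.List.foldl_ite_add_one]
        norm_num
      · intro acc x hx
        obtain ⟨hx0, hxlt⟩ := PySem.List.mem_pyRange_one.1 hx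
        obtain ⟨k, rfl⟩ := Int.eq_ofNat_of_zero_le hx0
        have hk : k < p.length := by
          simp only [PySem.List.len] at hxlt; exact_mod_cast hxlt
        have : PySem.List.pyGetD l (k : Int) 0 = PySem.List.pyGetD p (k : Int) 0 := by
          subst hl
          rw [PySem.List.pyGetD_natCast, PySem.List.pyGetD_natCast]
          exact List.getD_append p (v :: r') 0 k hk
        rw [this]
    rw [hv]
    by_cases hc : v ≤ (p.length : Int)
    · rw [if_pos hc, hinner]
      have := ih (p ++ [v]) (answer + (p.countP (fun x => decide (v < x)) : Nat)) (by simp [hl])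
      simp only [List.length_append, List.length_cons, List.length_nil, Nat.cast_add,
        Nat.cast_one, zero_add] at this ⊢
      rw [this]
      simp [spec, if_pos hc]
      ring
    · rw [if_neg hc]
      have := ih (p ++ [v]) answer (by simp [hl])
      simp only [List.length_append, List.length_cons, List.length_nil, Nat.cast_add,
        Nat.cast_one, zero_add] at this ⊢
      rw [this]
      simp [spec, if_neg hc]

-- Source B's while loop is a binary search: on a sorted list it returns a split point —
-- everything strictly before it is ≤ v, everything from it on is > v
lemma bsearch_spec (seen : List Int) (v : Int) :
    ∀ (lo hi : Nat), lo ≤ hi → hi ≤ seen.length →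
      seen.Pairwise (· ≤ ·) →
      (∀ j, j < lo → ∀ h : j < seen.length, seen[j] ≤ v) →
      (∀ j, hi ≤ j → ∀ h : j < seen.length, v < seen[j]) →
      lo ≤ bsearch seen v lo hi ∧ bsearch seen v lo hi ≤ hi ∧
        (∀ j, ∀ h : j < seen.length,
          (j < bsearch seen v lo hi → seen[j] ≤ v) ∧ (bsearch seen v lo hi ≤ j → v < seen[j])) := by
  intro lo hi
  generalize hn : hi - lo = n
  induction n using Nat.strong_induction_on generalizing lo hi with
  | _ n ih =>
  intro hlohi hhi hs hbelow habove
  rw [bsearch]; dsimp only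
  split_ifs with hlt hle
  · -- seen[mid] ≤ v: continue right of mid
    have hmid : (lo + hi) / 2 < seen.length := by omega
    have hmidle : seen[(lo + hi) / 2] ≤ v := by
      rwa [List.getD_eq_getElem seen 0 hmid] at hle
    have hb' : ∀ j, j < (lo + hi) / 2 + 1 → ∀ h : j < seen.length, seen[j] ≤ v := by
      intro j hj h
      rcases Nat.lt_or_ge j ((lo + hi) / 2) with hj' | hj'
      · exact le_trans (List.pairwise_iff_getElem.1 hs j _ h hmid hj') hmidle
      · have : j = (lo + hi) / 2 := by omega
        subst this; exact hmidle
    have := ih (hi - ((lo + hi) / 2 + 1)) (by omega) _ _ rfl (by omega) hhi hs hb' habove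
    exact ⟨by omega, this.2.1, this.2.2⟩
  · -- v < seen[mid]: continue left of mid
    have hmid : (lo + hi) / 2 < seen.length := by omega
    rw [List.getD_eq_getElem seen 0 hmid] at hle
    rw [not_le] at hle
    have ha' : ∀ j, (lo + hi) / 2 ≤ j → ∀ h : j < seen.length, v < seen[j] := by
      intro j hj h
      rcases Nat.lt_or_ge ((lo + hi) / 2) j with hj' | hj'
      · exact lt_of_lt_of_le hle (List.pairwise_iff_getElem.1 hs _ j hmid h hj')
      · have : j = (lo + hi) / 2 := by omega
        subst this; exact hle
    have := ih ((lo + hi) / 2 - lo) (by omega) _ _ rfl (by omega) (by omega) hs hbelow ha'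
    exact ⟨this.1, by omega, this.2.2⟩
  · exact ⟨le_refl _, by omega,
      fun j h => ⟨fun hj => hbelow j hj h, fun hj => habove j (by omega) h⟩⟩

-- Python's seen.insert(k, v) for 0 ≤ k ≤ len(seen)
lemma pyinsert_eq (xs : List Int) (k : Nat) (v : Int) (hk : k ≤ xs.length) :
    PySem.List.insert xs (k : Int) v = xs.take k ++ v :: xs.drop k := by
  simp only [PySem.List.insert, PySem.List.sliceIndices]
  norm_num
  split_ifs with h
  · exact absurd h (by omega)
  · rw [min_eq_left (by exact_mod_cast hk), Int.toNat_natCast]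

-- a split point of a list determines the count of elements > v
lemma count_gt (seen : List Int) (v : Int) (r : Nat) (hr : r ≤ seen.length)
    (hchar : ∀ j, ∀ h : j < seen.length, (j < r → seen[j] ≤ v) ∧ (r ≤ j → v < seen[j])) :
    seen.countP (fun x => decide (v < x)) = seen.length - r := by
  conv_lhs => rw [← List.take_append_drop r seen]
  rw [List.countP_append]
  have h1 : (seen.take r).countP (fun x => decide (v < x)) = 0 := by
    rw [List.countP_eq_zero]
    intro a ha
    obtain ⟨i, hi, rfl⟩ := List.mem_iff_getElem.1 ha
    have hir : i < r := by have := hi; simp [List.length_take] at this; omega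
    have hi' : i < seen.length := by omega
    rw [List.getElem_take]
    simp [not_lt.2 ((hchar i hi').1 hir)]
  have h2 : (seen.drop r).countP (fun x => decide (v < x)) = (seen.drop r).length := by
    rw [List.countP_eq_length]
    intro a ha
    obtain ⟨i, hi, rfl⟩ := List.mem_iff_getElem.1 ha
    have hi' : r + i < seen.length := by have := hi; simp [List.length_drop] at this; omega
    rw [List.getElem_drop]
    simp [(hchar (r + i) hi').2 (by omega)]
  rw [h1, h2, List.length_drop]
  omega

-- B's loop invariant: seen is a sorted permutation of the processed prefix p
lemma goB :
    ∀ (r p seen : List Int) (answer : Int), seen.Perm p → seen.Pairwise (· ≤ ·) →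
      ((r.foldl (fun (st : List Int × Int × Int) v =>
        let seen := st.1
        let i := st.2.1
        let answer := st.2.2
        let lo := bsearch seen v 0 seen.length
        let answer' := if v ≤ i then answer + ((seen.length : Int) - (lo : Int)) else answer
        (PySem.List.insert seen (lo : Int) v, i + 1, answer')) (seen, (p.length : Int), answer)).2.2)
        = answer + spec p r := by
  intro r
  induction r with
  | nil => intro p seen answer _ _; simp [spec]
  | cons v r' ih =>
    intro p seen answer hperm hsorted
    rw [List.foldl_cons]
    dsimp only
    set lo := bsearch seen v 0 seen.length with hlo
    have hspec := bsearch_spec seen v 0 seen.length (by omega) (le_refl _) hsorted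
      (by intro j hj _; omega) (by intro j hj h; omega)
    have hrle : lo ≤ seen.length := hspec.2.1
    have hchar := hspec.2.2
    have hcount : seen.countP (fun x => decide (v < x)) = seen.length - lo :=
      count_gt seen v lo hrle hchar
    have hlenp : seen.length = p.length := hperm.length_eq
    have hins : PySem.List.insert seen (lo : Int) v = seen.take lo ++ v :: seen.drop lo :=
      pyinsert_eq seen lo v hrle
    have hperm' : (seen.take lo ++ v :: seen.drop lo).Perm (p ++ [v]) := by
      have h1 : (seen.take lo ++ v :: seen.drop lo).Perm (v :: (seen.take lo ++ seen.drop lo)) :=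
        List.perm_middle
      rw [List.take_append_drop] at h1
      exact h1.trans ((hperm.cons v).trans (List.perm_append_singleton v p).symm)
    have hsorted' : (seen.take lo ++ v :: seen.drop lo).Pairwise (· ≤ ·) := by
      rw [List.pairwise_append]
      refine ⟨hsorted.sublist (List.take_sublist ..), ?_, ?_⟩
      · rw [List.pairwise_cons]
        refine ⟨?_, hsorted.sublist (List.drop_sublist ..)⟩
        intro y hy
        obtain ⟨i, hi, rfl⟩ := List.mem_iff_getElem.1 hy
        have hi' : lo + i < seen.length := by have := hi; simp [List.length_drop] at this; omega
        rw [List.getElem_drop]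
        exact le_of_lt ((hchar (lo + i) hi').2 (by omega))
      · intro a ha b hb
        obtain ⟨i, hi, rfl⟩ := List.mem_iff_getElem.1 ha
        have hilt : i < lo := by have := hi; simp [List.length_take] at this; omega
        have hi' : i < seen.length := by omega
        rw [List.getElem_take]
        have hav : seen[i] ≤ v := (hchar i hi').1 hilt
        rcases List.mem_cons.1 hb with rfl | hb'
        · exact hav
        · obtain ⟨j, hj, rfl⟩ := List.mem_iff_getElem.1 hb'
          have hj' : lo + j < seen.length := by have := hj; simp [List.length_drop] at this; omega
          rw [List.getElem_drop]
          exact le_trans hav (le_of_lt ((hchar (lo + j) hj').2 (by omega)))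
    rw [hins]
    have hrec := ih (p ++ [v]) (seen.take lo ++ v :: seen.drop lo)
      (if v ≤ (p.length : Int) then answer + ((seen.length : Int) - (lo : Int)) else answer)
      hperm' hsorted'
    simp only [List.length_append, List.length_cons, List.length_nil, Nat.cast_add,
      Nat.cast_one, zero_add] at hrec
    rw [hrec]
    have hpc : (p.countP (fun x => decide (v < x)) : Int) = (seen.length : Int) - (lo : Int) := by
      rw [← hperm.countP_eq (fun x => decide (v < x)), hcount]
      omega
    simp only [spec]
    by_cases hc : v ≤ (p.length : Int)
    · rw [if_pos hc, if_pos hc, hpc]; ring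
    · rw [if_neg hc, if_neg hc]; ring

-- ===== VERDICT (by name: the statement is the Claim_ definition above) =====
theorem solution_spec : Claim_equal_solution := by
  intro l _
  unfold Spec_solution solution solution_alt
  have hA := goA l l [] 0 rfl
  have hB := goB l [] [] 0 (List.Perm.refl _) (List.Pairwise.nil)
  simp only [List.length_nil, Nat.cast_zero] at hA hB
  rw [hA, hB]
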